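-- pv_equiv track=rewrite | github.com/wildcar/rtorrent-mcp | src/rtorrent_mcp/clients/rtorrent.py | _info_hash_from_magnet
-- ===== SOURCE A (Python) =====
-- def _info_hash_from_magnet(magnet: str) -> str | None:
--     # Accept ``urn:btih:<hex-or-base32>``; return uppercase hex for hex
--     # hashes, leave base32 as-is (rtorrent normalises internally).
--     marker = "urn:btih:"
--     idx = magnet.find(marker)
--     if idx == -1:
--         return None
--     tail = magnet[idx + len(marker) :]
--     end = min((tail.find(c) for c in "&?#" if tail.find(c) != -1), default=len(tail))
--     hash_part = tail[:end].strip()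
--     if len(hash_part) == 40 and all(c in "0123456789abcdefABCDEF" for c in hash_part):
--         return hash_part.upper()
--     return hash_part or None
-- ===== SOURCE B (Python) =====
-- def _info_hash_from_magnet(magnet: str) -> str | None:
--     # Single forward scan after the marker instead of A's min-of-three finds.
--     _, sep, tail = magnet.partition("urn:btih:")
--     if not sep:
--         return None
--     head = []
--     for ch in tail:
--         if ch in "&?#":
--             break
--         head.append(ch)
--     hash_part = "".join(head).strip()
--     if len(hash_part) == 40 and set(hash_part) <= set("0123456789abcdefABCDEF"):
--         return hash_part.upper()
--     return hash_part or None
-- ===== Notes on version B (the rewrite author's own statement) =====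
-- stated objective: idiomatic
-- what changed: B splits at the marker partition-style and truncates the tail with one forward scan that stops at the first delimiter character (hex test via set subset), replacing A's manual find, min-of-three delimiter finds and slice.
import Mathlib
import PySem

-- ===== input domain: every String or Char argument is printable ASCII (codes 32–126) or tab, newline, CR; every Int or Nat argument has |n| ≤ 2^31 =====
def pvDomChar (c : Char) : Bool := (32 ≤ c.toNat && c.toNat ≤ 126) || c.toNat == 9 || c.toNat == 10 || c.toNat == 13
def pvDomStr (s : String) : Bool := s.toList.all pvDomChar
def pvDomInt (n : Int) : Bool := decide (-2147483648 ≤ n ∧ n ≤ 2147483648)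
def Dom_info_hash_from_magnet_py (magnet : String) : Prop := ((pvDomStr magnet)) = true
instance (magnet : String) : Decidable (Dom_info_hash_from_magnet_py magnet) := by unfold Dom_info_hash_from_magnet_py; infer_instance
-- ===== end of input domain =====

-- B replaces A's manual find, min-of-three-finds and slice with a partition-style split and
-- a single forward scan that stops at the first '&', '?' or '#' (idiomatic; return value proved equal).

-- ===== PORT A =====
def info_hash_from_magnet_py (magnet : String) : Option String :=
  let m := magnet.toList
  let marker : List Char := ['u','r','n',':','b','t','i','h',':']
  let idx : Int := PySem.Chars.find m marker
  if idx = -1 then none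
  else
    let tail := PySem.List.slice m (some (idx + (marker.length : Int))) none
    let cands := (['&','?','#'].map (fun c => PySem.Chars.find tail [c])).filter (fun v => v != -1)
    let e : Int :=
      match PySem.List.min? cands (fun x => x) with
      | some v => v
      | none => (tail.length : Int)
    let hashPart := PySem.Chars.strip (PySem.List.slice tail none (some e))
    if hashPart.length == 40 &&
        hashPart.all (fun c => ("0123456789abcdefABCDEF".toList).contains c) then
      some (String.ofList (PySem.Chars.upper hashPart))
    else if hashPart.isEmpty then none else some (String.ofList hashPart)

-- ===== PORT B =====
-- the for/break loop of Source B: collect chars until the first delimiter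
def pvHeadLoop : List Char → List Char
  | [] => []
  | c :: cs => if (['&','?','#'] : List Char).contains c then [] else c :: pvHeadLoop cs

def info_hash_from_magnet_py_alt (magnet : String) : Option String :=
  let m := magnet.toList
  let marker : List Char := ['u','r','n',':','b','t','i','h',':']
  -- magnet.partition(marker): sep nonempty iff the marker occurs; tail = part after it
  let i : Int := PySem.Chars.find m marker
  if i = -1 then none
  else
    let tail := m.drop (i.toNat + marker.length)
    let hashPart := PySem.Chars.strip (pvHeadLoop tail)
    if hashPart.length == 40 &&
        PySem.Set.issubset (PySem.Set.ofList hashPart)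
          (PySem.Set.ofList ("0123456789abcdefABCDEF".toList)) then
      some (String.ofList (PySem.Chars.upper hashPart))
    else if hashPart.isEmpty then none else some (String.ofList hashPart)

-- ===== PRECONDITION & SPEC =====
def Spec_info_hash_from_magnet_py (magnet : String) (out : Option String) : Prop := out = info_hash_from_magnet_py_alt magnet
instance (magnet : String) (out : Option String) : Decidable (Spec_info_hash_from_magnet_py magnet out) := by unfold Spec_info_hash_from_magnet_py; infer_instance

-- ===== CLAIM (what is proved, stated in full; the proofs are below) =====
def Claim_equal_info_hash_from_magnet_py : Prop := ∀ (magnet : String), Dom_info_hash_from_magnet_py magnet → Spec_info_hash_from_magnet_py magnet (info_hash_from_magnet_py magnet)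

-- ===== LEMMAS AND PROOFS =====

theorem pvHeadLoop_eq_takeWhile (t : List Char) :
    pvHeadLoop t = t.takeWhile (fun c => !((['&','?','#'] : List Char).contains c)) := by
  induction t with
  | nil => rfl
  | cons c cs ih =>
    rw [List.takeWhile_cons]
    by_cases h : (['&','?','#'] : List Char).contains c
    · rw [pvHeadLoop, if_pos h, if_neg (by simp at h ⊢; tauto)]
    · rw [pvHeadLoop, if_neg h, if_pos (by simp at h ⊢; tauto), ih]

theorem pv_singleton_prefix_iff (c : Char) (l : List Char) : [c] <+: l ↔ l.head? = some c := by
  cases l with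
  | nil => simp
  | cons x xs =>
    constructor
    · intro h
      rcases h with ⟨r, hr⟩
      simp at hr
      simp [hr.1]
    · intro h
      simp at h
      exact ⟨xs, by simp [h]⟩

theorem pv_find_singleton_eq_neg_one_iff (t : List Char) (c : Char) :
    PySem.Chars.find t [c] = -1 ↔ c ∉ t := by
  rw [PySem.Chars.find_eq_neg_one_iff, List.singleton_infix_iff]

theorem pv_find_singleton_spec (t : List Char) (c : Char)
    (h : PySem.Chars.find t [c] ≠ -1) :
    t[(PySem.Chars.find t [c]).toNat]? = some c ∧
      ∀ i < (PySem.Chars.find t [c]).toNat, t[i]? ≠ some c := by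
  have h0 : 0 ≤ PySem.Chars.find t [c] := by
    have := PySem.Chars.neg_one_le_find (s := t) (sub := [c])
    omega
  obtain ⟨h1, h2⟩ := PySem.Chars.find_spec (s := t) (sub := [c]) h0
  rw [pv_singleton_prefix_iff, List.head?_drop] at h1
  refine ⟨h1, fun i hi hcontra => ?_⟩
  exact h2 i hi (by rw [pv_singleton_prefix_iff, List.head?_drop]; exact hcontra)

-- A's `min((tail.find(c) for c in "&?#" if ...), default=len(tail))` is the length of the
-- longest delimiter-free prefix.
theorem pv_endA_eq (t : List Char) :
    (match PySem.List.min?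
        ((['&','?','#'].map (fun c => PySem.Chars.find t [c])).filter (fun v => v != -1))
        (fun x => x) with
      | some v => v
      | none => (t.length : Int))
    = ((t.takeWhile (fun c => !((['&','?','#'] : List Char).contains c))).length : Int) := by
  set p : Char → Bool := fun c => !((['&','?','#'] : List Char).contains c) with hp
  set L := (t.takeWhile p).length with hL
  have htw : t.takeWhile p = t.take L := List.prefix_iff_eq_take.mp (List.takeWhile_prefix p)
  have hLlen : L ≤ t.length := by rw [hL]; exact (List.takeWhile_prefix p).length_le
  have F1 : ∀ i (hi : i < L), p (t[i]'(lt_of_lt_of_le hi hLlen)) = true := by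
    intro i hi
    have : t[i]'(lt_of_lt_of_le hi hLlen) ∈ t.takeWhile p := by
      rw [htw]
      have : (t.take L)[i]'(by simpa [Nat.lt_min] using ⟨hi, lt_of_lt_of_le hi hLlen⟩) ∈ t.take L :=
        List.getElem_mem _
      simpa using this
    exact List.mem_takeWhile_imp this
  have F2 : ∀ (hlt : L < t.length), p (t[L]'hlt) = false := by
    intro hlt
    have hlen := congrArg List.length (List.takeWhile_append_dropWhile (p := p) (l := t))
    simp only [List.length_append] at hlen
    have hd : 0 < (t.dropWhile p).length := by omega
    have hnot := List.dropWhile_get_zero_not (p := p) t hd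
    have hq : t[L]? = (t.dropWhile p)[0]? := by
      conv_lhs => rw [← List.takeWhile_append_dropWhile (p := p) (l := t)]
      rw [List.getElem?_append_right (by simp [hL])]
      simp [hL]
    rw [List.getElem?_eq_getElem hlt, List.getElem?_eq_getElem hd] at hq
    have := Option.some_inj.mp hq
    rw [this]
    simpa using hnot
  cases hmin : PySem.List.min?
      ((['&','?','#'].map (fun c => PySem.Chars.find t [c])).filter (fun v => v != -1))
      (fun x => x) with
  | none =>
    have hnil := (PySem.List.min?_eq_none_iff _ _).mp hmin
    have hall : ∀ c ∈ (['&','?','#'] : List Char), PySem.Chars.find t [c] = -1 := by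
      intro c hc
      by_contra hne
      have : PySem.Chars.find t [c] ∈
          (['&','?','#'].map (fun c => PySem.Chars.find t [c])).filter (fun v => v != -1) := by
        simp only [List.mem_filter, List.mem_map]
        exact ⟨⟨c, hc, rfl⟩, by simpa using hne⟩
      rw [hnil] at this
      simp at this
    have : t.takeWhile p = t := by
      rw [List.takeWhile_eq_self_iff]
      intro x hx
      simp only [hp, Bool.not_eq_true', List.contains_eq_mem, decide_eq_false_iff_not]
      intro hmem
      have := (pv_find_singleton_eq_neg_one_iff t x).mp (hall x hmem)
      exact this hx
    simp only [hL, this]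
  | some mv =>
    have hmem := PySem.List.min?_mem hmin
    simp only [List.mem_filter, List.mem_map] at hmem
    obtain ⟨⟨c0, hc0, hfc0⟩, hne⟩ := hmem
    have hne' : PySem.Chars.find t [c0] ≠ -1 := by rw [hfc0]; simpa using hne
    obtain ⟨hat, hminc⟩ := pv_find_singleton_spec t c0 hne'
    have h0 : 0 ≤ PySem.Chars.find t [c0] := by
      have := PySem.Chars.neg_one_le_find (s := t) (sub := [c0])
      omega
    set n := (PySem.Chars.find t [c0]).toNat with hn
    have hnlen : n < t.length := by
      by_contra hge
      simp [List.getElem?_eq_none (show t.length ≤ n by omega)] at hat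
    have hLn : L ≤ n := by
      by_contra hcon
      have hlt : n < L := by omega
      have hpn := F1 n hlt
      have heq : t[n]'(lt_of_lt_of_le hlt hLlen) = c0 := by
        have h' := hat
        rw [List.getElem?_eq_getElem (lt_of_lt_of_le hlt hLlen)] at h'
        exact Option.some_inj.mp h'
      rw [heq] at hpn
      simp only [hp, Bool.not_eq_true', List.contains_eq_mem, decide_eq_false_iff_not] at hpn
      exact hpn hc0
    have hnL : n ≤ L := by
      by_contra hcon
      have hlt : L < n := by omega
      have hLt : L < t.length := lt_trans hlt hnlen
      have hdelim := F2 hLt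
      set d := t[L]'hLt with hd
      have hdmem : d ∈ (['&','?','#'] : List Char) := by
        have := hdelim
        simp only [hp, Bool.not_eq_false', List.contains_eq_mem, decide_eq_true_eq] at this
        exact this
      have hdt : d ∈ t := List.getElem_mem _
      have hfd : PySem.Chars.find t [d] ≠ -1 :=
        fun hcontra => ((pv_find_singleton_eq_neg_one_iff t d).mp hcontra) hdt
      obtain ⟨hatd, hmind⟩ := pv_find_singleton_spec t d hfd
      have h0d : 0 ≤ PySem.Chars.find t [d] := by
        have := PySem.Chars.neg_one_le_find (s := t) (sub := [d])
        omega
      have hfdL : (PySem.Chars.find t [d]).toNat ≤ L := by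
        by_contra hgt
        exact hmind L (by omega) (List.getElem?_eq_getElem hLt)
      have hmvle : mv ≤ PySem.Chars.find t [d] := by
        have : PySem.Chars.find t [d] ∈
            (['&','?','#'].map (fun c => PySem.Chars.find t [c])).filter (fun v => v != -1) := by
          simp only [List.mem_filter, List.mem_map]
          exact ⟨⟨d, hdmem, rfl⟩, by simpa using hfd⟩
        simpa using PySem.List.min?_isMin hmin _ this
      have hmv : mv = (n : Int) := by rw [← hfc0]; omega
      omega
    have : n = L := le_antisymm hnL hLn
    simp only [← hfc0]
    omega

theorem pv_subset_eq_all (a b : List Char) :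
    PySem.Set.issubset (PySem.Set.ofList a) (PySem.Set.ofList b)
      = a.all (fun c => b.contains c) := by
  rw [Bool.eq_iff_iff, PySem.Set.issubset_iff]
  simp [List.all_eq_true, PySem.Set.mem_ofList]

-- ===== VERDICT (by name: the statement is the Claim_ definition above) =====
theorem info_hash_from_magnet_py_spec : Claim_equal_info_hash_from_magnet_py := by
  intro magnet _
  unfold Spec_info_hash_from_magnet_py info_hash_from_magnet_py info_hash_from_magnet_py_alt
  simp only []
  set m := magnet.toList
  set marker : List Char := ['u','r','n',':','b','t','i','h',':'] with hmarker
  by_cases hidx : PySem.Chars.find m marker = -1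
  · simp [hidx]
  · rw [if_neg hidx]
    have h0 : 0 ≤ PySem.Chars.find m marker := by
      have := PySem.Chars.neg_one_le_find (s := m) (sub := marker)
      omega
    set idx := PySem.Chars.find m marker with hidxdef
    have htail : PySem.List.slice m (some (idx + (marker.length : Int))) none
        = m.drop (idx.toNat + marker.length) := by
      rw [PySem.List.slice_from m (show (0:Int) ≤ idx + (marker.length : Int) by omega)]
      congr 1
      omega
    rw [htail]
    set tail := m.drop (idx.toNat + marker.length) with htaildef
    have hhash : PySem.List.slice tail none
        (some (match PySem.List.min?
            ((['&','?','#'].map (fun c => PySem.Chars.find tail [c])).filter (fun v => v != -1))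
            (fun x => x) with
          | some v => v
          | none => (tail.length : Int)))
        = pvHeadLoop tail := by
      rw [pv_endA_eq, PySem.List.slice_to tail (by positivity)]
      rw [pvHeadLoop_eq_takeWhile]
      simp only [Int.toNat_natCast]
      exact (List.prefix_iff_eq_take.mp (List.takeWhile_prefix _)).symm
    rw [hhash, pv_subset_eq_all, if_neg hidx]
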